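-- pv_equiv track=rewrite | github.com/zhongliwu/leetcode | bfs/t761_smallest_subset.py | min_elements
-- ===== SOURCE A (Python) =====
-- from typing import (
--     List,
-- )
-- import collections
--
-- def min_elements(arr: List[int]) -> int:
--     # write your code here
--     if not arr:
--         return 0
--
--     total_sum, min_set, n = sum(arr), float('inf'), len(arr)
--     queue = collections.deque()
--     queue.append([])
--     for num in arr:
--         for i in range(len(queue)):
--             next_subset = list(queue[i])
--             next_subset.append(num)
--             sum_next_subset = sum(next_subset)
--             if sum_next_subset > total_sum - sum_next_subset:
--                 min_set = min(min_set, len(next_subset))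
--             queue.append(next_subset)
--
--     return min_set
-- ===== SOURCE B (Python) =====
-- def min_elements(arr):
--     if not arr:
--         return 0
--     total = sum(arr)
--     s = 0
--     k = 0
--     for x in sorted(arr, reverse=True):
--         s += x
--         k += 1
--         if 2 * s > total:
--             return k
--     return -1
-- ===== Notes on version B (the rewrite author's own statement) =====
-- stated objective: faster
-- what changed: Replaces A's exponential BFS enumeration of every subset with sort-descending plus a greedy prefix scan: the answer is the first k whose k largest elements sum to more than half the total.
-- outside the precondition, e.g. on min_elements([0]): A returns inf, B returns -1; on min_elements([-1, -1]): A returns inf, B returns -1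
import Mathlib
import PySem

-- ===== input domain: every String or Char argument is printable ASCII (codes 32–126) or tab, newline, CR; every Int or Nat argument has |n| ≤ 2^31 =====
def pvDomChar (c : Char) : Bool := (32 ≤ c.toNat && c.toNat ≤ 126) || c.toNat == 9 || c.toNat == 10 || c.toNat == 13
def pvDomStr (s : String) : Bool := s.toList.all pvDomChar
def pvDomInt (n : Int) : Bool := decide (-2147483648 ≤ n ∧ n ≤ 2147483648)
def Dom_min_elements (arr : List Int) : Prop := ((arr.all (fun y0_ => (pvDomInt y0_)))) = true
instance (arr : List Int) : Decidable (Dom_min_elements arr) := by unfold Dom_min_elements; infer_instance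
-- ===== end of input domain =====

-- B replaces A's exponential BFS over all subsets by sort-descending + greedy prefix scan (objective: faster).

-- ===== PORT A =====
-- A's 'min_set = min(min_set, len(next_subset))' with min_set starting at float('inf'):
-- the float infinity is represented as 'none' (Option Int); under Pre_ a subset is always found,
-- so 'none' never reaches the result (the -1 in the final match is unreachable under Pre_).
def updMin (total : Int) (m : Option Int) (s : List Int) : Option Int :=
  if 2 * s.sum > total then
    some (match m with | none => (s.length : Int) | some v => min v (s.length : Int))
  else m

-- one iteration of 'for num in arr': scan the frozen queue, appending num to each subset
def stepA (total : Int) (st : List (List Int) × Option Int) (num : Int) :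
    List (List Int) × Option Int :=
  let res := st.1.foldl
    (fun st2 s => (st2.1 ++ [s ++ [num]], updMin total st2.2 (s ++ [num]))) ([], st.2)
  (st.1 ++ res.1, res.2)

def min_elements (arr : List Int) : Int :=
  if arr = [] then 0
  else
    let total := arr.sum
    let fin := arr.foldl (stepA total) ([[]], none)
    match fin.2 with | some v => v | none => -1

-- ===== PORT B =====
-- Source B's loop: s += x; k += 1; if 2*s > total: return k;  after the loop: -1
def loopB (total : Int) : List Int → Int → Int → Int
  | [], _, _ => -1
  | x :: xs, s, k => if 2 * (s + x) > total then k + 1 else loopB total xs (s + x) (k + 1)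

def min_elements_alt (arr : List Int) : Int :=
  if arr = [] then 0
  else loopB arr.sum (PySem.List.sorted arr (fun x => x) true) 0 0

-- ===== PRECONDITION & SPEC =====
-- Pre_ excludes exactly the nonempty arrays in which no subset's sum exceeds the sum of the
-- rest: there A returns float('inf') — a float, not a value of the declared int type — while
-- B returns -1. (A subset outweighing the rest exists iff some element is positive, or the
-- maximal element alone already outweighs the rest.)
def Pre_min_elements (arr : List Int) : Prop :=
  arr = [] ∨ (∃ x ∈ arr, 0 < x) ∨ (∃ x ∈ arr, (∀ y ∈ arr, y ≤ x) ∧ 2 * x > arr.sum)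
instance (arr : List Int) : Decidable (Pre_min_elements arr) := by
  unfold Pre_min_elements; infer_instance
def pvWitness_min_elements : List Int := [3, -1, 2]

def Spec_min_elements (arr : List Int) (out : Int) : Prop := out = min_elements_alt arr
instance (arr : List Int) (out : Int) : Decidable (Spec_min_elements arr out) := by
  unfold Spec_min_elements; infer_instance

-- ===== CLAIM (what is proved, stated in full; the proofs are below) =====
def Claim_equal_min_elements : Prop :=
  ∀ (arr : List Int), Dom_min_elements arr → Pre_min_elements arr →
    Spec_min_elements arr (min_elements arr)

-- ===== LEMMAS AND PROOFS =====

-- `some`-min accumulator (what updMin does to the length once the test passed)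
def omin (m : Option Int) (k : Int) : Option Int :=
  some (match m with | none => k | some v => min v k)

-- the candidate lengths A's scan minimises over
def qlens (total : Int) (ss : List (List Int)) : List Int :=
  (ss.filter (fun s => decide (2 * s.sum > total))).map (fun s => (s.length : Int))

theorem innerA (total num : Int) :
    ∀ (q acc : List (List Int)) (m : Option Int),
      q.foldl (fun st2 s => (st2.1 ++ [s ++ [num]], updMin total st2.2 (s ++ [num]))) (acc, m)
        = (acc ++ q.map (· ++ [num]), (q.map (· ++ [num])).foldl (updMin total) m) := by
  intro q
  induction q with
  | nil => intro acc m; simp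
  | cons s q ih => intro acc m; simp [List.foldl_cons, ih]

theorem sublists_shape (l : List Int) :
    l.sublists = [] :: l.sublists.drop 1 ∧ ∀ s ∈ l.sublists.drop 1, s ≠ [] := by
  induction l using List.reverseRecOn with
  | nil => simp
  | append_singleton p a ih =>
    obtain ⟨h1, h2⟩ := ih
    rw [List.sublists_concat, h1]
    constructor
    · simp
    · intro s hs
      simp only [List.cons_append, List.drop_one, List.tail_cons, List.mem_append] at hs
      rcases hs with hs | hs
      · exact h2 s (by simpa using hs)
      · rw [h1] at hs
        simp only [List.map_cons, List.mem_cons, List.mem_map] at hs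
        rcases hs with rfl | ⟨t, _, rfl⟩ <;> simp

theorem outerA (total : Int) (p : List Int) :
    p.foldl (stepA total) ([[]], none)
      = (p.sublists, (p.sublists.drop 1).foldl (updMin total) none) := by
  induction p using List.reverseRecOn with
  | nil => simp
  | append_singleton p a ih =>
    rw [List.foldl_append, List.foldl_cons, List.foldl_nil, ih]
    have hshape := sublists_shape p
    rw [List.sublists_concat]
    simp only [stepA, innerA]
    have hne : 1 ≤ p.sublists.length := by rw [hshape.1]; simp
    rw [Prod.mk.injEq]
    refine ⟨by simp, ?_⟩
    rw [List.drop_append_of_le_length hne, List.foldl_append]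

theorem updMin_to_omin (total : Int) :
    ∀ (ss : List (List Int)) (m : Option Int),
      ss.foldl (updMin total) m = (qlens total ss).foldl omin m := by
  intro ss
  induction ss with
  | nil => intro m; simp [qlens]
  | cons s ss ih =>
    intro m
    by_cases h : 2 * s.sum > total
    · cases m <;> simp [qlens, List.foldl_cons, updMin, omin, h, ih]
    · simp [qlens, List.foldl_cons, updMin, h, ih]

theorem omin_some : ∀ (q : List Int) (v : Int), q.foldl omin (some v) = some (q.foldl min v) := by
  intro q
  induction q with
  | nil => intro v; simp
  | cons a q ih => intro v; simp [List.foldl_cons, omin, ih]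

theorem omin_min? (q : List Int) : q.foldl omin none = q.min? := by
  cases q with
  | nil => simp [List.min?]
  | cons a q => simp [List.foldl_cons, omin, omin_some, List.min?]

theorem sum_filter_split (p : Int → Bool) (l : List Int) :
    (l.filter p).sum + (l.filter (fun x => !p x)).sum = l.sum := by
  induction l with
  | nil => simp
  | cons a l ih =>
    by_cases h : p a <;> simp [h] <;> omega

theorem take_max_sum :
    ∀ {d t : List Int}, t.Sublist d → d.Pairwise (fun a b => b ≤ a) →
      t.sum ≤ (d.take t.length).sum := by
  intro d t h
  induction h with
  | slnil => intro _; simp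
  | @cons l₁ l₂ a h ih =>
    intro hp
    have hp' : l₂.Pairwise (fun a b => b ≤ a) := (List.pairwise_cons.mp hp).2
    have hba : ∀ b ∈ l₂, b ≤ a := (List.pairwise_cons.mp hp).1
    have hle := ih hp'
    cases hl : l₁ with
    | nil => simp
    | cons y t₂ =>
      subst hl
      have hlen : t₂.length + 1 ≤ l₂.length := h.length_le
      have hk : t₂.length < l₂.length := by omega
      have htake : l₂.take (t₂.length + 1) = l₂.take t₂.length ++ [l₂[t₂.length]] := by
        rw [List.take_add_one]
        simp [List.getElem?_eq_getElem hk]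
      have hmem : l₂[t₂.length] ∈ l₂ := List.getElem_mem hk
      have h1 : l₂[t₂.length] ≤ a := hba _ hmem
      have h2 : (y :: t₂).sum ≤ (l₂.take (t₂.length + 1)).sum := hle
      rw [htake, List.sum_append] at h2
      simp only [List.sum_cons, List.sum_nil, add_zero] at h2
      simp only [List.length_cons, List.take_succ_cons, List.sum_cons]
      omega
  | @cons₂ l₁ l₂ a h ih =>
    intro hp
    have hle := ih (List.pairwise_cons.mp hp).2
    simp [List.take_succ_cons]
    omega

theorem loopB_spec (total : Int) :
    ∀ (d : List Int) (s k : Int),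
      (∃ m : Nat, m < d.length ∧ 2 * (s + (d.take (m + 1)).sum) > total) →
      ∃ m0 : Nat, loopB total d s k = k + (m0 + 1) ∧ m0 < d.length ∧
        2 * (s + (d.take (m0 + 1)).sum) > total ∧
        ∀ j < m0, ¬(2 * (s + (d.take (j + 1)).sum) > total) := by
  intro d
  induction d with
  | nil => rintro s k ⟨m, hm, _⟩; simp at hm
  | cons x xs ih =>
    rintro s k ⟨m, hm, hq⟩
    by_cases h : 2 * (s + x) > total
    · refine ⟨0, by simp [loopB, h], by simp, by simpa using h, by omega⟩
    · have hex' : ∃ m', m' < xs.length ∧ 2 * ((s + x) + (xs.take (m' + 1)).sum) > total := by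
        cases m with
        | zero =>
          exfalso; apply h
          simpa using hq
        | succ m' =>
          refine ⟨m', by simp at hm; omega, ?_⟩
          rw [List.take_succ_cons] at hq
          simp at hq
          omega
      obtain ⟨m0, e, hlt, hq0, hmin⟩ := ih (s + x) (k + 1) hex'
      refine ⟨m0 + 1, ?_, by simp; omega, ?_, ?_⟩
      · simp [loopB, h, e]; omega
      · rw [List.take_succ_cons]; simp; omega
      · intro j hj
        cases j with
        | zero => simpa using h
        | succ j' =>
          have := hmin j' (by omega)
          rw [List.take_succ_cons]; simp; simp at this; omega

-- under Pre_ a nonempty subset outweighing the rest exists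
theorem exists_qual (arr : List Int) (hpre : Pre_min_elements arr) (hnil : arr ≠ []) :
    ∃ t : List Int, t.Sublist arr ∧ t ≠ [] ∧ 2 * t.sum > arr.sum := by
  rcases hpre with h | ⟨x, hx, hxpos⟩ | ⟨x, hx, hmax, hbig⟩
  · exact absurd h hnil
  · refine ⟨arr.filter (fun y => decide (0 < y)), List.filter_sublist, ?_, ?_⟩
    · intro hf
      have : x ∈ arr.filter (fun y => decide (0 < y)) := by
        simp [List.mem_filter, hx, hxpos]
      simp [hf] at this
    · have hsplit := sum_filter_split (fun y => decide (0 < y)) arr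
      have hpos : 0 < (arr.filter (fun y => decide (0 < y))).sum := by
        apply List.sum_pos
        · intro y hy
          simpa using (List.mem_filter.mp hy).2
        · intro hf
          have : x ∈ arr.filter (fun y => decide (0 < y)) := by
            simp [List.mem_filter, hx, hxpos]
          simp [hf] at this
      have hneg : (arr.filter (fun y => !decide (0 < y))).sum ≤ 0 := by
        have hall : ∀ y ∈ arr.filter (fun y => !decide (0 < y)), y ≤ 0 := by
          intro y hy
          have := (List.mem_filter.mp hy).2
          simp at this
          exact this
        generalize hl : arr.filter (fun y => !decide (0 < y)) = l at hall
        clear hl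
        induction l with
        | nil => simp
        | cons a l ih =>
          have h1 := hall a (by simp)
          have h2 := ih (fun y hy => hall y (List.mem_cons_of_mem a hy))
          simp only [List.sum_cons]
          omega
      omega
  · exact ⟨[x], List.singleton_sublist.mpr hx, by simp, by simpa using hbig⟩

-- a qualifying sublist of length k forces the k largest elements to qualify
theorem sublist_le_take (arr t : List Int) (ht : t.Sublist arr) :
    t.sum ≤ ((PySem.List.sorted arr (fun x => x) true).take t.length).sum ∧
      t.length ≤ (PySem.List.sorted arr (fun x => x) true).length := by
  set d := PySem.List.sorted arr (fun x => x) true with hd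
  have hsp : t.Subperm d :=
    (ht.subperm).trans ((PySem.List.sorted_perm arr (fun x => x) true).symm.subperm)
  obtain ⟨t', ht'p, ht's⟩ := hsp
  have h1 : t'.sum ≤ (d.take t'.length).sum :=
    take_max_sum ht's (by simpa [hd] using PySem.List.sorted_pairwise_rev arr (fun x => x))
  have h2 : t'.sum = t.sum := ht'p.sum_eq
  have h3 : t'.length = t.length := ht'p.length_eq
  exact ⟨by rw [← h2, ← h3]; exact h1, by rw [← h3]; exact ht's.length_le⟩

-- the k largest elements are realizable as a sublist of arr (same length and sum)
theorem take_realizable (arr : List Int) (k : Nat) (hk : k ≤ arr.length) :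
    ∃ t : List Int, t.Sublist arr ∧ t.length = k ∧
      t.sum = ((PySem.List.sorted arr (fun x => x) true).take k).sum := by
  set d := PySem.List.sorted arr (fun x => x) true with hd
  have hsp : (d.take k).Subperm arr :=
    ((d.take_sublist k).subperm).trans ((PySem.List.sorted_perm arr (fun x => x) true).subperm)
  obtain ⟨t, htp, hts⟩ := hsp
  have hlen : d.length = arr.length := PySem.List.length_sorted arr (fun x => x) true
  refine ⟨t, hts, ?_, htp.sum_eq⟩
  rw [htp.length_eq, List.length_take, hlen]
  omega

-- ===== VERDICT (by name: the statement is the Claim_ definition above) =====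
theorem min_elements_spec : Claim_equal_min_elements := by
  intro arr _ hpre
  unfold Spec_min_elements
  by_cases hnil : arr = []
  · subst hnil; simp [min_elements, min_elements_alt]
  · set total := arr.sum with htotal
    set d := PySem.List.sorted arr (fun x => x) true with hd
    have hdlen : d.length = arr.length := PySem.List.length_sorted arr (fun x => x) true
    obtain ⟨t, hts, htne, htq⟩ := exists_qual arr hpre hnil
    have hlen1 : 1 ≤ t.length := by
      cases t with
      | nil => exact absurd rfl htne
      | cons a t => simp
    obtain ⟨hP, hPle⟩ := sublist_le_take arr t hts
    rw [← hd] at hP hPle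
    rw [← htotal] at htq
    have hexB : ∃ m : Nat, m < d.length ∧ 2 * ((0 : Int) + (d.take (m + 1)).sum) > total := by
      refine ⟨t.length - 1, by omega, ?_⟩
      have h1 : t.length - 1 + 1 = t.length := by omega
      rw [h1]
      omega
    obtain ⟨m0, he, hm0, hq0, hmin⟩ := loopB_spec total d 0 0 hexB
    have hBval : min_elements_alt arr = ((m0 : Int) + 1) := by
      rw [min_elements_alt, if_neg hnil, ← htotal, ← hd, he]
      ring
    have hmin? : (qlens total (arr.sublists.drop 1)).min? = some ((m0 : Int) + 1) := by
      rw [List.min?_eq_some_iff]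
      constructor
      · obtain ⟨t', ht's, ht'l, ht'sum⟩ := take_realizable arr (m0 + 1) (by omega)
        have ht'ne : t' ≠ [] := by
          intro hf; rw [hf] at ht'l; simp at ht'l
        have ht'mem : t' ∈ arr.sublists.drop 1 := by
          have hmem : t' ∈ arr.sublists := List.mem_sublists.mpr ht's
          rw [(sublists_shape arr).1] at hmem
          rcases List.mem_cons.mp hmem with hf | h
          · exact absurd hf ht'ne
          · exact h
        have ht'q : 2 * t'.sum > total := by
          rw [ht'sum, ← hd]
          simpa using hq0
        refine List.mem_map.mpr ⟨t', List.mem_filter.mpr ⟨ht'mem, by simpa using ht'q⟩, ?_⟩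
        rw [ht'l]; push_cast; ring
      · intro b hb
        obtain ⟨s, hsf, hsb⟩ := List.mem_map.mp hb
        obtain ⟨hsmem, hsq⟩ := List.mem_filter.mp hsf
        have hsq' : 2 * s.sum > total := by simpa using hsq
        have hssub : s.Sublist arr := by
          apply List.mem_sublists.mp
          rw [(sublists_shape arr).1]
          exact List.mem_cons.mpr (Or.inr hsmem)
        have hsne : s ≠ [] := (sublists_shape arr).2 s hsmem
        have hslen1 : 1 ≤ s.length := by
          cases s with
          | nil => exact absurd rfl hsne
          | cons a s => simp
        obtain ⟨hsP, hsPle⟩ := sublist_le_take arr s hssub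
        rw [← hd] at hsP hsPle
        have hPs : 2 * ((0 : Int) + (d.take s.length).sum) > total := by
          omega
        have : ¬ s.length - 1 < m0 := by
          intro hf
          apply hmin (s.length - 1) hf
          have : s.length - 1 + 1 = s.length := by omega
          rw [this]
          exact hPs
        rw [← hsb]
        have : m0 + 1 ≤ s.length := by omega
        exact_mod_cast this
    have hAval : min_elements arr = ((m0 : Int) + 1) := by
      simp only [min_elements, if_neg hnil]
      rw [← htotal, outerA, updMin_to_omin, omin_min?, hmin?]
    rw [hAval, hBval]
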